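-- pv_equiv track=rewrite | github.com/mortyc126-debug/SHA-256 | bit_solver_benchmark.py | has_dead_clause
-- ===== SOURCE A (Python) =====
-- def has_dead_clause(clauses, n, fixed):
--     for clause in clauses:
--         satisfied = False
--         free = 0
--         for v, s in clause:
--             if v in fixed:
--                 if (s == 1 and fixed[v] == 1) or (s == -1 and fixed[v] == 0):
--                     satisfied = True
--                     break
--             else:
--                 free += 1
--         if not satisfied and free == 0:
--             return True
--     return False
-- ===== SOURCE B (Python) =====
-- def has_dead_clause(clauses, n, fixed):
--     # Inverted characterization: collect the set of clause indices that contain at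
--     # least one "alive" literal (unassigned or satisfied); a dead clause exists
--     # exactly when some index was never collected, i.e. |alive| < #clauses.
--     alive = set()
--     for i, clause in enumerate(clauses):
--         for v, s in clause:
--             if v not in fixed or (s == 1 and fixed[v] == 1) or (s == -1 and fixed[v] == 0):
--                 alive.add(i)
--     return len(alive) < len(clauses)
-- ===== Notes on version B (the rewrite author's own statement) =====
-- stated objective: alternative
-- what changed: Inverted the search: instead of testing each clause for deadness with a satisfied-flag, free-counter and early exit, B collects the set of clause indices that contain an alive (unassigned or satisfied) literal and reports a dead clause via the cardinality test len(alive) < len(clauses).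
import Mathlib
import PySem

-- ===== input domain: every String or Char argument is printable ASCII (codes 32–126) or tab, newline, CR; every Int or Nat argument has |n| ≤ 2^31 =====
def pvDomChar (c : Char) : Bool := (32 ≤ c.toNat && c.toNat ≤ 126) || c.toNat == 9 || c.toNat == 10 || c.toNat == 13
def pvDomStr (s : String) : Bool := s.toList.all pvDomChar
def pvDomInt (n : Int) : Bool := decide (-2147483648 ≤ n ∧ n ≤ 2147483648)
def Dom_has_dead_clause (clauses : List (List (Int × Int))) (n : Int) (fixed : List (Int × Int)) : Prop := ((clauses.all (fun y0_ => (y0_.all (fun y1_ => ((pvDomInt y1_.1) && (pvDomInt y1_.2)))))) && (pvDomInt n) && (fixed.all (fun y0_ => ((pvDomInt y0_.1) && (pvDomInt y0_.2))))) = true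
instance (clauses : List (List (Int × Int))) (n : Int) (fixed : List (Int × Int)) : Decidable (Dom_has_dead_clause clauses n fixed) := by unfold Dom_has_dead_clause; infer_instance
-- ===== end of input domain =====

-- B inverts A's search: instead of scanning each clause for deadness with a flag and a
-- free-counter, it collects the SET of clause indices containing an alive (unassigned or
-- satisfied) literal and reports a dead clause by the cardinality test |alive| < #clauses
-- (objective: alternative).

-- ===== PORT A =====
-- inner loop of A over one clause: returns (satisfied, free); breaks on a satisfying literal
def pvInnerA (fixed : List (Int × Int)) (free : Int) : List (Int × Int) → Bool × Int
  | [] => (false, free)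
  | (v, s) :: rest =>
    match PySem.Dict.get? (PySem.Dict.mk fixed) v with
    | some fv =>
      if (s == 1 && fv == 1) || (s == -1 && fv == 0) then (true, free)
      else pvInnerA fixed free rest
    | none => pvInnerA fixed (free + 1) rest

def pvLoopA (fixed : List (Int × Int)) : List (List (Int × Int)) → Bool
  | [] => false
  | clause :: rest =>
    let r := pvInnerA fixed 0 clause
    if !r.1 && r.2 == 0 then true else pvLoopA fixed rest

def has_dead_clause (clauses : List (List (Int × Int))) (n : Int) (fixed : List (Int × Int)) : Bool :=
  pvLoopA fixed clauses

-- ===== PORT B =====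
-- 'v not in fixed or (s == 1 and fixed[v] == 1) or (s == -1 and fixed[v] == 0)'
def pvAliveLit (fixed : List (Int × Int)) (v s : Int) : Bool :=
  match PySem.Dict.get? (PySem.Dict.mk fixed) v with
  | none => true
  | some fv => (s == 1 && fv == 1) || (s == -1 && fv == 0)

def has_dead_clause_alt (clauses : List (List (Int × Int))) (n : Int) (fixed : List (Int × Int)) : Bool :=
  let alive : PySem.Set Int :=
    (PySem.List.enumerate clauses 0).foldl
      (fun acc ic =>
        ic.2.foldl (fun a l => if pvAliveLit fixed l.1 l.2 then PySem.Set.add a ic.1 else a) acc)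
      PySem.Set.empty
  decide (PySem.Set.len alive < (clauses.length : Int))

-- ===== PRECONDITION & SPEC =====
def Spec_has_dead_clause (clauses : List (List (Int × Int))) (n : Int) (fixed : List (Int × Int)) (out : Bool) : Prop := out = has_dead_clause_alt clauses n fixed
instance (clauses : List (List (Int × Int))) (n : Int) (fixed : List (Int × Int)) (out : Bool) : Decidable (Spec_has_dead_clause clauses n fixed out) := by unfold Spec_has_dead_clause; infer_instance

-- ===== CLAIM (what is proved, stated in full; the proofs are below) =====
def Claim_equal_has_dead_clause : Prop := ∀ (clauses : List (List (Int × Int))) (n : Int) (fixed : List (Int × Int)), Dom_has_dead_clause clauses n fixed → Spec_has_dead_clause clauses n fixed (has_dead_clause clauses n fixed)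

-- ===== LEMMAS AND PROOFS =====

-- A's inner loop signals a dead clause (not satisfied, no free literal) exactly when no
-- literal of the clause is alive (and the running free-counter was 0).
lemma innerA_char (fixed : List (Int × Int)) (clause : List (Int × Int)) :
    ∀ free : Int, 0 ≤ free →
      (!(pvInnerA fixed free clause).1 && (pvInnerA fixed free clause).2 == 0)
        = (!(clause.any (fun l => pvAliveLit fixed l.1 l.2)) && free == 0) := by
  induction clause with
  | nil => intro free _; simp [pvInnerA]
  | cons hd tl ih =>
    intro free hfree
    obtain ⟨v, s⟩ := hd
    simp only [pvInnerA, List.any_cons]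
    cases hg : PySem.Dict.get? (PySem.Dict.mk fixed) v with
    | none =>
      have ha : pvAliveLit fixed v s = true := by simp [pvAliveLit, hg]
      have hz : ((free : Int) + 1 == 0) = false := by
        simp only [beq_eq_false_iff_ne, ne_eq]; omega
      simp [ha, ih (free + 1) (by omega), hz]
    | some fv =>
      by_cases hsat : ((s == 1 && fv == 1) || (s == -1 && fv == 0)) = true
      · have ha : pvAliveLit fixed v s = true := by simp [pvAliveLit, hg, hsat]
        simp [hsat, ha]
      · simp only [Bool.not_eq_true] at hsat
        have ha : pvAliveLit fixed v s = false := by simp [pvAliveLit, hg, hsat]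
        simp [hsat, ha, ih free hfree]

lemma loopA_eq_any (fixed : List (Int × Int)) (clauses : List (List (Int × Int))) :
    pvLoopA fixed clauses
      = clauses.any (fun c => !(c.any (fun l => pvAliveLit fixed l.1 l.2))) := by
  induction clauses with
  | nil => simp [pvLoopA]
  | cons clause rest ih =>
    simp only [pvLoopA, List.any_cons]
    have h := innerA_char fixed clause 0 (le_refl 0)
    simp only [BEq.rfl, Bool.and_true] at h
    rw [h]
    cases hc : !(clause.any (fun l => pvAliveLit fixed l.1 l.2)) <;> simp [ih]

lemma set_add_idem {α : Type} [BEq α] [LawfulBEq α] (s : PySem.Set α) (x : α) :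
    PySem.Set.add (PySem.Set.add s x) x = PySem.Set.add s x := by
  by_cases h : x ∈ s <;> simp [PySem.Set.add, List.contains_eq_mem, h]

-- B's inner loop over one clause either records the clause index once (some alive literal)
-- or leaves the accumulator unchanged.
lemma innerB_char (fixed : List (Int × Int)) (i : Int) (clause : List (Int × Int)) :
    ∀ acc : PySem.Set Int,
      clause.foldl (fun a l => if pvAliveLit fixed l.1 l.2 then PySem.Set.add a i else a) acc
        = if clause.any (fun l => pvAliveLit fixed l.1 l.2) then PySem.Set.add acc i else acc := by
  induction clause with
  | nil => intro acc; simp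
  | cons hd tl ih =>
    intro acc
    simp only [List.foldl_cons, List.any_cons]
    by_cases h : pvAliveLit fixed hd.1 hd.2 = true
    · rw [if_pos h, ih]
      by_cases ht : tl.any (fun l => pvAliveLit fixed l.1 l.2) = true
      · rw [if_pos ht, set_add_idem, if_pos (by simp [h])]
      · rw [if_neg ht, if_pos (by simp [h])]
    · simp only [Bool.not_eq_true] at h
      rw [if_neg (by simp [h]), ih]
      simp only [h, Bool.false_or]

lemma set_add_fresh (s : PySem.Set Int) (x : Int) (hx : x ∉ s) :
    PySem.Set.add s x = s ++ [x] := by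
  simp [PySem.Set.add, List.contains_eq_mem, hx]

-- Outer invariant: folding B's loop over enumerate starting at index i, with every element
-- of the accumulator below i, grows the accumulator's length by the number of clauses
-- containing an alive literal.
lemma outerB_len (fixed : List (Int × Int)) (clauses : List (List (Int × Int))) :
    ∀ (i : Int) (acc : PySem.Set Int), (∀ j ∈ acc, j < i) →
      ((PySem.List.enumerate clauses i).foldl
        (fun acc ic =>
          ic.2.foldl (fun a l => if pvAliveLit fixed l.1 l.2 then PySem.Set.add a ic.1 else a) acc)
        acc).length
      = acc.length + clauses.countP (fun c => c.any (fun l => pvAliveLit fixed l.1 l.2)) := by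
  induction clauses with
  | nil => intro i acc _; simp [PySem.List.enumerate_nil]
  | cons clause rest ih =>
    intro i acc hacc
    rw [PySem.List.enumerate_cons, List.foldl_cons]
    simp only
    rw [innerB_char]
    by_cases hc : clause.any (fun l => pvAliveLit fixed l.1 l.2) = true
    · have hi : i ∉ acc := fun h => absurd (hacc i h) (lt_irrefl i)
      have hacc' : ∀ j ∈ acc ++ [i], j < i + 1 := by
        intro j hj
        rcases List.mem_append.mp hj with h | h
        · have := hacc j h; omega
        · have : j = i := by simpa using h
          omega
      rw [hc, if_pos rfl, set_add_fresh acc i hi, ih (i + 1) (acc ++ [i]) hacc']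
      simp [List.countP_cons, hc]
      omega
    · simp only [Bool.not_eq_true] at hc
      have hacc' : ∀ j ∈ acc, j < i + 1 := by intro j hj; have := hacc j hj; omega
      rw [hc, if_neg (by simp), ih (i + 1) acc hacc']
      simp [List.countP_cons, hc]

lemma altB_char (clauses : List (List (Int × Int))) (n : Int) (fixed : List (Int × Int)) :
    has_dead_clause_alt clauses n fixed
      = decide ((clauses.countP (fun c => c.any (fun l => pvAliveLit fixed l.1 l.2)) : Int)
          < (clauses.length : Int)) := by
  unfold has_dead_clause_alt
  have h := outerB_len fixed clauses 0 PySem.Set.empty (by intro j hj; simp [PySem.Set.empty] at hj)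
  simp only [PySem.Set.empty, List.length_nil, Nat.zero_add] at h
  simp [PySem.Set.len, h]

-- countP p < length iff some clause fails p
lemma count_lt_iff_any_not (clauses : List (List (Int × Int))) (p : List (Int × Int) → Bool) :
    clauses.any (fun c => !(p c)) = decide ((clauses.countP p : Int) < (clauses.length : Int)) := by
  by_cases h : ∀ c ∈ clauses, p c = true
  · have hcp : clauses.countP p = clauses.length := List.countP_eq_length.mpr h
    have hany : clauses.any (fun c => !(p c)) = false := by
      simp only [List.any_eq_false]
      intro c hc; simp [h c hc]
    rw [hany, hcp]; simp
  · have hcp : clauses.countP p ≠ clauses.length := fun he => h (List.countP_eq_length.mp he)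
    have hle : clauses.countP p ≤ clauses.length := List.countP_le_length
    have hany : clauses.any (fun c => !(p c)) = true := by
      push_neg at h
      obtain ⟨c, hc, hpc⟩ := h
      exact List.any_eq_true.mpr ⟨c, hc, by simp [hpc]⟩
    rw [hany]
    have : (clauses.countP p : Int) < (clauses.length : Int) := by
      exact_mod_cast lt_of_le_of_ne hle hcp
    simp [this]

theorem has_dead_clause_spec : Claim_equal_has_dead_clause := by
  intro clauses n fixed _
  unfold Spec_has_dead_clause has_dead_clause
  rw [loopA_eq_any, altB_char]
  exact count_lt_iff_any_not clauses _
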